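-- pv_equiv track=rewrite | github.com/shubhampkj/CodeWars | Python/solomon's-quest-for-the-temporal-crystal.py | solomons_quest
-- ===== SOURCE A (Python) =====
-- def solomons_quest(arr):
--     x, y = 0, 0
--     dilation = 0
--
--     for li in arr:
--
--         dilation += li[0]
--         distance = li[2] * pow(2,dilation)
--
--         if li [1] == 0:
--             y += distance
--         elif li[1] == 2:
--             y -= distance
--         elif li[1] == 1:
--             x += distance
--         else:
--             x -= distance
--
--     return [x,y]
-- ===== SOURCE B (Python) =====
-- def solomons_quest(arr):
--     dils = []
--     t = 0
--     for li in arr: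
--         t += li[0]
--         dils.append(t)
--     pairs = list(zip(arr, dils))
--     x = sum(li[2] * 2 ** d for li, d in pairs if li[1] == 1) \
--       - sum(li[2] * 2 ** d for li, d in pairs if li[1] not in (0, 1, 2))
--     y = sum(li[2] * 2 ** d for li, d in pairs if li[1] == 0) \
--       - sum(li[2] * 2 ** d for li, d in pairs if li[1] == 2)
--     return [x, y]
-- ===== Notes on version B (the rewrite author's own statement) =====
-- stated objective: alternative
-- what changed: Replaces A's single interleaved loop mutating x and y with a prefix-sum pass that materialises the cumulative dilations, then computes x and y as four separate filtered sums over the (move, dilation) pairs.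
-- outside the precondition, e.g. on solomons_quest([[-1, 0, 4]]): A returns [0, 2.0], B returns [0, 2.0]
import Mathlib
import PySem

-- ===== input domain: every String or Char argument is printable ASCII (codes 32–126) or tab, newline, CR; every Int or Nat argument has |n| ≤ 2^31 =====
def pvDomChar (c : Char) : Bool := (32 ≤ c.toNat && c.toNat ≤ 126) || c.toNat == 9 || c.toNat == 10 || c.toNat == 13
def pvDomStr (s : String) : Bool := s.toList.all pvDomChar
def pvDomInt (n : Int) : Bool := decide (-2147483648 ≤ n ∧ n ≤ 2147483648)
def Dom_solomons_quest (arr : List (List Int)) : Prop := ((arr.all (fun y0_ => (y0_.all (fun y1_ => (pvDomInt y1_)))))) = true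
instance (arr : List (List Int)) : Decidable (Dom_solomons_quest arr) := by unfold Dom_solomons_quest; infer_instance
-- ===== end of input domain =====

-- B replaces A's interleaved x/y-mutating loop with a prefix-sum of dilations plus four filtered sums; same O(n) cost, different decomposition.


-- ===== PORT A =====
-- one loop over arr, mutating (x, y, dilation); 'pow(2, dilation)' is exact on Pre_ (cumulative dilation ≥ 0)
def solomons_quest_step (st : Int × Int × Int) (li : List Int) : Int × Int × Int :=
  let dil := st.2.2 + (PySem.List.pyGet? li 0).getD 0
  let dist := (PySem.List.pyGet? li 2).getD 0 * 2 ^ dil.toNat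
  let h := (PySem.List.pyGet? li 1).getD 0
  if h == 0 then (st.1, st.2.1 + dist, dil)
  else if h == 2 then (st.1, st.2.1 - dist, dil)
  else if h == 1 then (st.1 + dist, st.2.1, dil)
  else (st.1 - dist, st.2.1, dil)

def solomons_quest (arr : List (List Int)) : List Int :=
  let s := arr.foldl solomons_quest_step (0, 0, 0)
  [s.1, s.2.1]

-- ===== PORT B =====
-- prefix-sum loop building the cumulative dilations ('dils.append(t)')
def altDilsStep (p : List Int × Int) (li : List Int) : List Int × Int :=
  let t := p.2 + (PySem.List.pyGet? li 0).getD 0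
  (p.1 ++ [t], t)

def altContrib (q : List Int × Int) : Int :=
  (PySem.List.pyGet? q.1 2).getD 0 * 2 ^ q.2.toNat

def altDir (q : List Int × Int) : Int :=
  (PySem.List.pyGet? q.1 1).getD 0

-- 'sum(li[2] * 2**d for (li, d) in pairs if <pred>)'
def altSum (p : (List Int × Int) → Bool) (pairs : List (List Int × Int)) : Int :=
  (pairs.filter p).foldl (fun s q => s + altContrib q) 0

def solomons_quest_alt (arr : List (List Int)) : List Int :=
  let dils := (arr.foldl altDilsStep ([], 0)).1
  let pairs := arr.zip dils
  [altSum (fun q => altDir q == 1) pairs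
     - altSum (fun q => !(altDir q == 0 || altDir q == 1 || altDir q == 2)) pairs,
   altSum (fun q => altDir q == 0) pairs
     - altSum (fun q => altDir q == 2) pairs]

-- ===== PRECONDITION & SPEC =====
-- Pre_ excludes inputs where A raises IndexError (a move shorter than 3 entries) and inputs where some
-- cumulative dilation is negative, on which pow(2, dilation) makes A return floats, not ints.
def Pre_solomons_quest (arr : List (List Int)) : Prop :=
  (∀ li ∈ arr, 3 ≤ li.length) ∧
  (∀ i : Nat, i < arr.length →
    0 ≤ (((arr.take (i + 1)).map (fun li => (PySem.List.pyGet? li 0).getD 0)).sum))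
instance (arr : List (List Int)) : Decidable (Pre_solomons_quest arr) := by
  unfold Pre_solomons_quest; infer_instance

def pvWitness_solomons_quest : List (List Int) := [[1, 0, 3], [2, 1, 5], [0, 2, 2], [1, 7, 4]]

def Spec_solomons_quest (arr : List (List Int)) (out : List Int) : Prop := out = solomons_quest_alt arr
instance (arr : List (List Int)) (out : List Int) : Decidable (Spec_solomons_quest arr out) := by unfold Spec_solomons_quest; infer_instance

-- ===== CLAIM (what is proved, stated in full; the proofs are below) =====
def Claim_equal_solomons_quest : Prop := ∀ (arr : List (List Int)), Dom_solomons_quest arr → Pre_solomons_quest arr → Spec_solomons_quest arr (solomons_quest arr)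

-- ===== LEMMAS AND PROOFS =====

-- common recursive specification: (x, y) contributed by the remaining moves, given the dilation so far
def gS (d : Int) : List (List Int) → Int × Int
  | [] => (0, 0)
  | li :: rest =>
    let d' := d + (PySem.List.pyGet? li 0).getD 0
    let dist := (PySem.List.pyGet? li 2).getD 0 * 2 ^ d'.toNat
    let p := gS d' rest
    let h := (PySem.List.pyGet? li 1).getD 0
    if h == 0 then (p.1, p.2 + dist)
    else if h == 2 then (p.1, p.2 - dist)
    else if h == 1 then (p.1 + dist, p.2)
    else (p.1 - dist, p.2)

-- the cumulative dilations, as a scan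
def scanD (d : Int) : List (List Int) → List Int
  | [] => []
  | li :: rest =>
    let d' := d + (PySem.List.pyGet? li 0).getD 0
    d' :: scanD d' rest

theorem dils_eq (arr : List (List Int)) : ∀ (acc : List Int) (d : Int),
    (arr.foldl altDilsStep (acc, d)).1 = acc ++ scanD d arr := by
  induction arr with
  | nil => intro acc d; simp [scanD]
  | cons li rest ih =>
    intro acc d
    simp only [List.foldl_cons, altDilsStep, scanD, ih, List.append_assoc, List.singleton_append]

theorem altSum_eq (p : (List Int × Int) → Bool) (pairs : List (List Int × Int)) :
    altSum p pairs = ((pairs.filter p).map altContrib).sum := by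
  unfold altSum
  rw [PySem.List.foldl_add]
  simp

theorem altSum_cons (p : (List Int × Int) → Bool) (q : List Int × Int)
    (pairs : List (List Int × Int)) :
    altSum p (q :: pairs) = (if p q then altContrib q else 0) + altSum p pairs := by
  simp only [altSum_eq, List.filter_cons]
  split <;> simp [add_comm]

theorem a_loop (arr : List (List Int)) : ∀ (x y d : Int),
    (arr.foldl solomons_quest_step (x, y, d)).1 = x + (gS d arr).1 ∧
    (arr.foldl solomons_quest_step (x, y, d)).2.1 = y + (gS d arr).2 := by
  induction arr with
  | nil => intro x y d; simp [gS]
  | cons li rest ih =>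
    intro x y d
    simp only [List.foldl_cons, solomons_quest_step, gS]
    split
    · obtain ⟨h1, h2⟩ := ih x (y + _) _
      constructor
      · rw [h1]
      · rw [h2]; ring
    split
    · obtain ⟨h1, h2⟩ := ih x (y - _) _
      constructor
      · rw [h1]
      · rw [h2]; ring
    split
    · obtain ⟨h1, h2⟩ := ih (x + _) y _
      constructor
      · rw [h1]; ring
      · rw [h2]
    · obtain ⟨h1, h2⟩ := ih (x - _) y _
      constructor
      · rw [h1]; ring
      · rw [h2]

theorem b_sums (arr : List (List Int)) : ∀ (d : Int),
    altSum (fun q => altDir q == 1) (arr.zip (scanD d arr))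
      - altSum (fun q => !(altDir q == 0 || altDir q == 1 || altDir q == 2)) (arr.zip (scanD d arr))
      = (gS d arr).1 ∧
    altSum (fun q => altDir q == 0) (arr.zip (scanD d arr))
      - altSum (fun q => altDir q == 2) (arr.zip (scanD d arr))
      = (gS d arr).2 := by
  induction arr with
  | nil => intro d; simp [scanD, altSum, gS]
  | cons li rest ih =>
    intro d
    simp only [scanD, gS, List.zip_cons_cons, altSum_cons]
    obtain ⟨h1, h2⟩ := ih (d + (PySem.List.pyGet? li 0).getD 0)
    have hc : altContrib (li, d + (PySem.List.pyGet? li 0).getD 0)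
        = (PySem.List.pyGet? li 2).getD 0 * 2 ^ (d + (PySem.List.pyGet? li 0).getD 0).toNat := rfl
    by_cases e0 : (PySem.List.pyGet? li 1).getD 0 = 0
    · simp only [altDir, Bool.not_or] at h1 h2 ⊢
      simp [e0, hc]
      constructor <;> linarith [h1, h2]
    · by_cases e2 : (PySem.List.pyGet? li 1).getD 0 = 2
      · simp only [altDir, Bool.not_or] at h1 h2 ⊢
        simp [e2, hc]
        constructor <;> linarith [h1, h2]
      · by_cases e1 : (PySem.List.pyGet? li 1).getD 0 = 1
        · simp only [altDir, Bool.not_or] at h1 h2 ⊢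
          simp [e1, hc]
          constructor <;> linarith [h1, h2]
        · simp only [altDir, Bool.not_or] at h1 h2 ⊢
          simp [e0, e2, e1, hc]
          constructor <;> linarith [h1, h2]

-- ===== VERDICT (by name: the statement is the Claim_ definition above) =====
theorem solomons_quest_spec : Claim_equal_solomons_quest := by
  intro arr _ _
  unfold Spec_solomons_quest solomons_quest solomons_quest_alt
  rw [dils_eq]
  obtain ⟨a1, a2⟩ := a_loop arr 0 0 0
  obtain ⟨b1, b2⟩ := b_sums arr 0
  simp only [List.nil_append] at *
  rw [a1, a2, b1, b2]
  simp
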